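-- pv_equiv track=rewrite | github.com/YASHYASHKINGGOD/linkedin-scrapper-rebirth | src/ingest/combined_links_csv.py | _detect_header_indices
-- ===== SOURCE A (Python) =====
-- from typing import List, Dict, Any, Optional
--
-- HEADER_KEYS = {
--     "company": ["company"],
--     "role": ["role", "title", "position"],
--     "location": ["location", "city"],
--     "link": ["link", "post link", "job link", "url", "application link"],
-- }
--
-- def _detect_header_indices(row: List[str]) -> Dict[str, int]:
--     idx: Dict[str, int] = {}
--     lower = [str(c).strip().lower() for c in row]
--     for key, aliases in HEADER_KEYS.items():
--         for i, cell in enumerate(lower):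
--             if any(alias in cell for alias in aliases):
--                 idx[key] = i
--                 break
--     # Require at least link column to proceed
--     return idx if "link" in idx else {}
-- ===== SOURCE B (Python) =====
-- from typing import List, Dict
--
-- HEADER_KEYS = {
--     "company": ["company"],
--     "role": ["role", "title", "position"],
--     "location": ["location", "city"],
--     "link": ["link", "post link", "job link", "url", "application link"],
-- }
--
-- def _detect_header_indices(row: List[str]) -> Dict[str, int]:
--     # One left-to-right scan of the row; keys not yet located are kept in
--     # `remaining` and dropped as soon as a cell matches, so each key keeps its
--     # first-occurrence index and the scan can stop once every key is found.
--     cells = [str(c).strip().lower() for c in row]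
--     remaining = list(HEADER_KEYS)
--     found: Dict[str, int] = {}
--     for i, cell in enumerate(cells):
--         if not remaining:
--             break
--         hits = [k for k in remaining if any(a in cell for a in HEADER_KEYS[k])]
--         for k in hits:
--             found[k] = i
--         remaining = [k for k in remaining if k not in hits]
--     if "link" not in found:
--         return {}
--     return {k: found[k] for k in HEADER_KEYS if k in found}
-- ===== Notes on version B (the rewrite author's own statement) =====
-- stated objective: alternative
-- what changed: B replaces A's per-key re-scan of the whole row by a single left-to-right scan of the cells that maintains the set of not-yet-located keys (with early exit once all are found) and reassembles the result in canonical key order.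
import Mathlib
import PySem

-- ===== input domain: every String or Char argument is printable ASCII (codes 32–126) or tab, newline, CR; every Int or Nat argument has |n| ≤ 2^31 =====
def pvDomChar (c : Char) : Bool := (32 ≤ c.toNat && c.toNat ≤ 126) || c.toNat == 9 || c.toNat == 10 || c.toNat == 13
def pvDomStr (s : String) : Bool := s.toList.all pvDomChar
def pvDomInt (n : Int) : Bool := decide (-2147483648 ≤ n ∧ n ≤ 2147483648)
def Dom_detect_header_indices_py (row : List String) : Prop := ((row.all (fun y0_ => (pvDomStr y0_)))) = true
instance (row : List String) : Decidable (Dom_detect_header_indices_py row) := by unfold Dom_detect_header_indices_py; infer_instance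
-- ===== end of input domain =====

-- B replaces A's per-key re-scan of the row by one left-to-right scan maintaining the
-- not-yet-located keys, reassembled in canonical key order (objective: alternative).

-- ===== PORT A =====

-- the module constant HEADER_KEYS (dict → association list in insertion order)
def pvHEADER_KEYS : List (String × List String) :=
  [("company", ["company"]),
   ("role", ["role", "title", "position"]),
   ("location", ["location", "city"]),
   ("link", ["link", "post link", "job link", "url", "application link"])]

-- any(alias in cell for alias in aliases)
def pvAliasIn (aliases : List String) (cell : String) : Bool :=
  aliases.any (fun a => PySem.Str.isIn a cell)

-- A's inner loop: 'for i, cell in enumerate(lower): if any(...): idx[key] = i; break'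
def pvFindA (aliases : List String) : List (Int × String) → Option Int
  | [] => none
  | (i, cell) :: rest => if pvAliasIn aliases cell then some i else pvFindA aliases rest

def detect_header_indices_py (row : List String) : List (String × Int) :=
  let lower := row.map (fun c => PySem.Str.lower (PySem.Str.strip c))
  let idx := pvHEADER_KEYS.foldl (fun d kv =>
      match pvFindA kv.2 (PySem.List.enumerate lower) with
      | some i => d.insert kv.1 i
      | none => d) (PySem.Dict.empty : PySem.Dict String Int)
  if idx.contains "link" then idx.items else []

-- ===== PORT B =====

-- HEADER_KEYS[k]  (lookup in the module dict)
def pvAliasesOf (k : String) : List String :=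
  ((PySem.Dict.ofList pvHEADER_KEYS).get? k).getD []

-- B's scan: one pass over the enumerated cells carrying (remaining, found)
def pvScanB : List (Int × String) → List String → PySem.Dict String Int → PySem.Dict String Int
  | [], _, found => found
  | (i, cell) :: rest, remaining, found =>
      if remaining.isEmpty then found
      else
        let hits := remaining.filter (fun k => pvAliasIn (pvAliasesOf k) cell)
        pvScanB rest (remaining.filter (fun k => !pvAliasIn (pvAliasesOf k) cell))
          (hits.foldl (fun d k => d.insert k i) found)

def detect_header_indices_py_alt (row : List String) : List (String × Int) :=
  let cells := row.map (fun c => PySem.Str.lower (PySem.Str.strip c))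
  let found := pvScanB (PySem.List.enumerate cells) (pvHEADER_KEYS.map Prod.fst) PySem.Dict.empty
  if found.contains "link" then
    pvHEADER_KEYS.filterMap (fun kv => (found.get? kv.1).map (fun v => (kv.1, v)))
  else []

-- ===== PRECONDITION & SPEC =====
def Spec_detect_header_indices_py (row : List String) (out : List (String × Int)) : Prop := out = detect_header_indices_py_alt row
instance (row : List String) (out : List (String × Int)) : Decidable (Spec_detect_header_indices_py row out) := by unfold Spec_detect_header_indices_py; infer_instance

-- ===== CLAIM (what is proved, stated in full; the proofs are below) =====
def Claim_equal_detect_header_indices_py : Prop := ∀ (row : List String), Dom_detect_header_indices_py row → Spec_detect_header_indices_py row (detect_header_indices_py row)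

-- ===== LEMMAS AND PROOFS =====

-- inserting a batch of keys not containing k leaves k's lookup alone
theorem pv_foldl_insert_get?_notmem (l : List String) (i : Int) (d : PySem.Dict String Int)
    (k : String) (hk : k ∉ l) :
    (l.foldl (fun d x => d.insert x i) d).get? k = d.get? k := by
  induction l generalizing d with
  | nil => rfl
  | cons x xs ih =>
      simp only [List.foldl_cons]
      rw [ih _ (fun h => hk (List.mem_cons_of_mem _ h)),
        PySem.Dict.get?_insert_of_ne _ i (fun h => hk (by simp [h]))]

-- inserting a batch of distinct keys containing k sets k's lookup to i
theorem pv_foldl_insert_get?_mem (l : List String) (i : Int) (d : PySem.Dict String Int)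
    (k : String) (hnd : l.Nodup) (hk : k ∈ l) :
    (l.foldl (fun d x => d.insert x i) d).get? k = some i := by
  induction l generalizing d with
  | nil => cases hk
  | cons x xs ih =>
      simp only [List.foldl_cons]
      rcases List.mem_cons.mp hk with h | h
      · subst h
        rw [pv_foldl_insert_get?_notmem _ _ _ _ (List.nodup_cons.mp hnd).1,
          PySem.Dict.get?_insert_self]
      · exact ih _ (List.nodup_cons.mp hnd).2 h

-- keys outside `remaining` are never touched by the scan
theorem pv_scan_get?_notmem (e : List (Int × String)) (rem : List String)
    (found : PySem.Dict String Int) (k : String) (hk : k ∉ rem) :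
    (pvScanB e rem found).get? k = found.get? k := by
  induction e generalizing rem found with
  | nil => rfl
  | cons p rest ih =>
      obtain ⟨i, cell⟩ := p
      rw [pvScanB]
      split
      · rfl
      · rw [ih _ _ (fun h => hk (List.mem_of_mem_filter h)),
          pv_foldl_insert_get?_notmem _ _ _ _ (fun h => hk (List.mem_of_mem_filter h))]

-- a key in `remaining` ends up at the index of the first matching cell
theorem pv_scan_get?_mem (e : List (Int × String)) (rem : List String)
    (found : PySem.Dict String Int) (k : String) (hnd : rem.Nodup) (hk : k ∈ rem)
    (h0 : found.get? k = none) :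
    (pvScanB e rem found).get? k = pvFindA (pvAliasesOf k) e := by
  induction e generalizing rem found with
  | nil => simpa [pvScanB, pvFindA] using h0
  | cons p rest ih =>
      obtain ⟨i, cell⟩ := p
      rw [pvScanB, pvFindA]
      have hne : ¬ rem.isEmpty = true := by
        cases rem with
        | nil => cases hk
        | cons a l => simp
      rw [if_neg hne]
      by_cases hm : pvAliasIn (pvAliasesOf k) cell = true
      · rw [if_pos hm]
        have hkh : k ∈ rem.filter (fun k => pvAliasIn (pvAliasesOf k) cell) :=
          List.mem_filter.mpr ⟨hk, hm⟩
        have hknot : k ∉ rem.filter (fun k => !pvAliasIn (pvAliasesOf k) cell) := by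
          intro h
          have := (List.mem_filter.mp h).2
          simp [hm] at this
        rw [pv_scan_get?_notmem _ _ _ _ hknot,
          pv_foldl_insert_get?_mem _ _ _ _ (hnd.filter _) hkh]
      · rw [if_neg hm]
        have hkh : k ∉ rem.filter (fun k => pvAliasIn (pvAliasesOf k) cell) := by
          intro h
          exact hm (by simpa using (List.mem_filter.mp h).2)
        exact ih _ _ (hnd.filter _)
          (List.mem_filter.mpr ⟨hk, by simp [hm]⟩)
          ((pv_foldl_insert_get?_notmem _ _ _ _ hkh).trans h0)

-- A's outer loop over fresh distinct keys builds exactly the filterMap of first matches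
theorem pv_foldl_optinsert_items (l : List (String × List String))
    (e : List (Int × String)) (d : PySem.Dict String Int)
    (hnd : (d.keys ++ l.map Prod.fst).Nodup) :
    (l.foldl (fun d kv =>
        match pvFindA kv.2 e with
        | some i => d.insert kv.1 i
        | none => d) d).items
      = d.items ++ l.filterMap (fun kv => (pvFindA kv.2 e).map (fun v => (kv.1, v))) := by
  induction l generalizing d with
  | nil => simp
  | cons kv rest ih =>
      obtain ⟨k, as⟩ := kv
      have hnotin : k ∉ d.keys := fun h =>
        (List.disjoint_of_nodup_append hnd) h (by simp)
      cases hfa : pvFindA as e with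
      | none =>
          simp only [List.foldl_cons, List.filterMap_cons, hfa, Option.map]
          exact ih d (hnd.sublist ((List.Sublist.refl _).append
            (List.sublist_cons_self _ _)))
      | some i =>
          have hcont : d.contains k = false := by
            rw [PySem.Dict.contains_eq_decide_mem_keys]
            simp [hnotin]
          simp only [List.foldl_cons, List.filterMap_cons, hfa, Option.map]
          rw [ih (d.insert k i) (by
            rw [PySem.Dict.keys_insert_of_not_contains d i hcont]
            simpa [List.append_assoc] using hnd),
            PySem.Dict.items_insert_of_not_contains d i hcont]
          simp [Option.map]

-- ===== VERDICT (by name: the statement is the Claim_ definition above) =====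
theorem detect_header_indices_py_spec : Claim_equal_detect_header_indices_py := by
  intro row _
  unfold Spec_detect_header_indices_py detect_header_indices_py detect_header_indices_py_alt
  dsimp only
  set e := PySem.List.enumerate (row.map (fun c => PySem.Str.lower (PySem.Str.strip c))) with he
  have hA := pv_foldl_optinsert_items pvHEADER_KEYS e PySem.Dict.empty (by decide)
  have hB1 := pv_scan_get?_mem e (pvHEADER_KEYS.map Prod.fst) PySem.Dict.empty "company"
    (by decide) (by decide) (PySem.Dict.get?_empty _)
  have hB2 := pv_scan_get?_mem e (pvHEADER_KEYS.map Prod.fst) PySem.Dict.empty "role"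
    (by decide) (by decide) (PySem.Dict.get?_empty _)
  have hB3 := pv_scan_get?_mem e (pvHEADER_KEYS.map Prod.fst) PySem.Dict.empty "location"
    (by decide) (by decide) (PySem.Dict.get?_empty _)
  have hB4 := pv_scan_get?_mem e (pvHEADER_KEYS.map Prod.fst) PySem.Dict.empty "link"
    (by decide) (by decide) (PySem.Dict.get?_empty _)
  have ha1 : pvAliasesOf "company" = ["company"] := by decide
  have ha2 : pvAliasesOf "role" = ["role", "title", "position"] := by decide
  have ha3 : pvAliasesOf "location" = ["location", "city"] := by decide
  have ha4 : pvAliasesOf "link" = ["link", "post link", "job link", "url", "application link"] := by decide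
  rw [ha1] at hB1; rw [ha2] at hB2; rw [ha3] at hB3; rw [ha4] at hB4
  have hcA : (pvHEADER_KEYS.foldl (fun d kv =>
      match pvFindA kv.2 e with
      | some i => d.insert kv.1 i
      | none => d) (PySem.Dict.empty : PySem.Dict String Int)).contains "link"
      = decide ("link" ∈ ((PySem.Dict.empty : PySem.Dict String Int).items ++
          pvHEADER_KEYS.filterMap (fun kv => (pvFindA kv.2 e).map (fun v => (kv.1, v)))).map (·.1)) := by
    rw [PySem.Dict.contains_eq_decide_mem_keys]
    simp only [PySem.Dict.keys, hA]
  have hcB := PySem.Dict.contains_eq_isSome_get?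
    (pvScanB e (pvHEADER_KEYS.map Prod.fst) PySem.Dict.empty) "link"
  rw [hB4] at hcB
  have hkeys : pvHEADER_KEYS.map Prod.fst = ["company", "role", "location", "link"] := by decide
  rw [hcA, hA, hcB]
  rw [hkeys] at hB1 hB2 hB3 hB4
  simp only [pvHEADER_KEYS, List.filterMap_cons, List.filterMap_nil, List.map_cons, List.map_nil]
  rw [hB1, hB2, hB3, hB4]
  rcases Option.eq_none_or_eq_some (pvFindA ["company"] e) with h1 | ⟨v1, h1⟩ <;>
    rcases Option.eq_none_or_eq_some (pvFindA ["role", "title", "position"] e) with h2 | ⟨v2, h2⟩ <;>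
      rcases Option.eq_none_or_eq_some (pvFindA ["location", "city"] e) with h3 | ⟨v3, h3⟩ <;>
        rcases Option.eq_none_or_eq_some
            (pvFindA ["link", "post link", "job link", "url", "application link"] e) with h4 | ⟨v4, h4⟩ <;>
          simp [h1, h2, h3, h4, PySem.Dict.empty]
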